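-- pv_equiv track=rewrite | github.com/mjogodnik22/Seating-Configuration | engine.py | seatsToFill
-- ===== SOURCE A (Python) =====
-- def seatsToFill(x,y,s):
--     ret = []
--     p = divisors(s)
--     dimensions = [[p,int(s/p)] for p in p] # creates a list of pairs of possible p/q values
--     for dim in dimensions:
--         possibility = []
--         for xi in range(x, x+dim[0]):
--             for yi in range(y, y+dim[1]):
--                 possibility.append([xi, yi])
--         ret.append(possibility) # creates a list of lists where each inner list is all the seats that would need to be filled to accomodate that size/shape block
--     return ret
--
-- def divisors(n):
--     ret = []
--     for i in range(1, int(n/2)+1):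
--         if n % i == 0:
--             ret.append(i)
--     ret.append(n) # adds n as a divisor to allow for horizontal line seating
--     ret.remove(1) # removes 1 as a divisor to prevent vertical line seating
--     return ret
-- ===== SOURCE B (Python) =====
-- def seatsToFill(x, y, s):
--     # Divisors of s collected by trial division up to sqrt(s):
--     # small divisors ascending, their cofactors descending.
--     small, large = [], []
--     i = 1
--     while i * i <= s:
--         if s % i == 0:
--             small.append(i)
--             q = s // i
--             if i != q:
--                 large.append(q)
--         i += 1
--     dims = [d for d in small + large[::-1] if d != 1]
--     return [[[xi, yi] for xi in range(x, x + p) for yi in range(y, y + s // p)]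
--             for p in dims]
-- ===== Notes on version B (the rewrite author's own statement) =====
-- stated objective: alternative
-- what changed: Divisors are found by trial division up to sqrt(s) (small divisors plus reversed cofactors, then dropping 1) instead of A's linear scan to s/2 plus append/remove, and the coordinate blocks are built with comprehensions instead of nested append loops.
import Mathlib
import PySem

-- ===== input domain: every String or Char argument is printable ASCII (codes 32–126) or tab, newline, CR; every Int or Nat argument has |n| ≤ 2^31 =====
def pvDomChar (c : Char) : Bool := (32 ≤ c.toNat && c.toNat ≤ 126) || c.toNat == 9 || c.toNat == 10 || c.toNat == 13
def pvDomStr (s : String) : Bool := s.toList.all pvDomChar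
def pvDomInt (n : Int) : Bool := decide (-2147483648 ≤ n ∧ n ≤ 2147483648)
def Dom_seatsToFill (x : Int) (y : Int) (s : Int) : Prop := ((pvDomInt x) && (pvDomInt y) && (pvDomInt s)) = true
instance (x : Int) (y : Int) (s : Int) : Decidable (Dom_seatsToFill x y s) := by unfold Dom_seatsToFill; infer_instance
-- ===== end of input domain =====

-- B finds the divisors of s by trial division up to sqrt(s) (small divisors plus reversed
-- cofactors, dropping 1) instead of A's linear scan to s/2 with append(s)/remove(1), and builds
-- the coordinate blocks with comprehensions; return values agree for all s >= 1 (Pre_).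


-- ===== PORT A =====
-- divisors(n): scan 1..int(n/2), append n, remove 1 (remove raises ValueError when 1 is
-- absent — exactly the inputs Pre_ excludes, where `.getD []` is never reached).
def divisorsA (n : Int) : List Int :=
  let ret := (PySem.List.pyRange 1 (PySem.Int.floordiv n 2 + 1) 1).foldl
      (fun ret i => if PySem.Int.mod n i == 0 then ret ++ [i] else ret) []
  let ret := ret ++ [n]
  (PySem.List.remove? ret 1).getD []

def seatsToFill (x : Int) (y : Int) (s : Int) : List (List (List Int)) :=
  let p := divisorsA s
  -- int(s/p) is exact float division for a divisor p of s within the domain, = floor division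
  let dimensions := p.map (fun p => (p, PySem.Int.floordiv s p))
  dimensions.foldl (fun ret dim =>
    let possibility := (PySem.List.pyRange x (x + dim.1) 1).foldl (fun poss xi =>
        (PySem.List.pyRange y (y + dim.2) 1).foldl (fun poss yi => poss ++ [[xi, yi]]) poss) []
    ret ++ [possibility]) []

-- ===== PORT B =====
-- the while loop of Source B: i from 1 while i*i <= s, collecting small divisors and cofactors;
-- fuel only totalizes the loop (s.toNat steps always suffice, proved below)
def divPairs (s : Int) (fuel : Nat) (i : Int) (small large : List Int) : List Int × List Int :=
  match fuel with
  | 0 => (small, large)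
  | Nat.succ f =>
    if i * i ≤ s then
      if PySem.Int.mod s i == 0 then
        let q := PySem.Int.floordiv s i
        divPairs s f (i + 1) (small ++ [i]) (if i == q then large else large ++ [q])
      else
        divPairs s f (i + 1) small large
    else (small, large)

def seatsToFill_alt (x : Int) (y : Int) (s : Int) : List (List (List Int)) :=
  let sl := divPairs s s.toNat 1 [] []
  let dims := (sl.1 ++ sl.2.reverse).filter (fun d => d ≠ 1)
  dims.map (fun p =>
    (PySem.List.pyRange x (x + p) 1).flatMap (fun xi =>
      (PySem.List.pyRange y (y + PySem.Int.floordiv s p) 1).map (fun yi => [xi, yi])))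

-- ===== PRECONDITION & SPEC =====
-- A raises ValueError (divisors' remove(1)) exactly when s ≤ 0; s ≥ 1 is everything A returns on.
def Pre_seatsToFill (x : Int) (y : Int) (s : Int) : Prop := 1 ≤ s
instance (x : Int) (y : Int) (s : Int) : Decidable (Pre_seatsToFill x y s) := by unfold Pre_seatsToFill; infer_instance
def pvWitness_seatsToFill : Int × Int × Int := (0, 0, 6)

def Spec_seatsToFill (x : Int) (y : Int) (s : Int) (out : List (List (List Int))) : Prop := out = seatsToFill_alt x y s
instance (x : Int) (y : Int) (s : Int) (out : List (List (List Int))) : Decidable (Spec_seatsToFill x y s out) := by unfold Spec_seatsToFill; infer_instance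

-- ===== CLAIM (what is proved, stated in full; the proofs are below) =====
def Claim_equal_seatsToFill : Prop := ∀ (x : Int) (y : Int) (s : Int), Dom_seatsToFill x y s → Pre_seatsToFill x y s → Spec_seatsToFill x y s (seatsToFill x y s)

-- ===== LEMMAS AND PROOFS =====

-- the ascending list of all divisors of s (1 and s included), for s ≥ 1
def divList (s : Int) : List Int :=
  (PySem.List.pyRange 1 (s + 1) 1).filter (fun d => PySem.Int.mod s d == 0)

theorem le_sqrt_iff (s i : Int) (hi : 1 ≤ i) : i ≤ Int.sqrt s ↔ i * i ≤ s := by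
  have hii : 1 ≤ i * i := one_le_mul_of_one_le_of_one_le hi hi
  rcases lt_or_ge s 0 with hneg | hs
  · have h0 : Int.sqrt s = 0 := by
      unfold Int.sqrt
      rw [Int.toNat_of_nonpos (by omega)]
      simp
    rw [h0]
    constructor <;> intro h <;> omega
  · unfold Int.sqrt
    rw [show i ≤ (Nat.sqrt s.toNat : Int) ↔ i.toNat ≤ Nat.sqrt s.toNat by omega, Nat.le_sqrt]
    have h1 : ((i.toNat : Int)) = i := by omega
    constructor
    · intro h
      have h2 : ((i.toNat * i.toNat : Nat) : Int) ≤ ((s.toNat : Nat) : Int) := by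
        exact_mod_cast Int.ofNat_le.mpr h
      push_cast at h2; rw [h1] at h2
      omega
    · intro h
      have h2 : ((i.toNat * i.toNat : Nat) : Int) ≤ (s.toNat : Int) := by push_cast; rw [h1]; omega
      exact_mod_cast h2

theorem mod_beq_iff (s j : Int) : (PySem.Int.mod s j == 0) = true ↔ j ∣ s := by
  rw [beq_iff_eq, PySem.Int.mod_eq_zero_iff_dvd]

theorem floordiv_exact (s j : Int) (hj : j ∣ s) : PySem.Int.floordiv s j * j = s := by
  have h := PySem.Int.floordiv_mul_add_mod s j
  rw [(PySem.Int.mod_eq_zero_iff_dvd s j).mpr hj] at h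
  omega

theorem divPairs_spec (s : Int) :
    ∀ (fuel : Nat) (i : Int) (small large : List Int), 1 ≤ i → Int.sqrt s + 1 ≤ i + fuel →
    divPairs s fuel i small large =
      (small ++ (PySem.List.pyRange i (Int.sqrt s + 1) 1).filter
          (fun j => PySem.Int.mod s j == 0),
       large ++ ((PySem.List.pyRange i (Int.sqrt s + 1) 1).filter
          (fun j => PySem.Int.mod s j == 0 && j != PySem.Int.floordiv s j)).map
            (fun j => PySem.Int.floordiv s j)) := by
  intro fuel
  induction fuel with
  | zero =>
    intro i small large hi hfuel
    rw [PySem.List.pyRange_one_eq_nil (by omega)]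
    simp [divPairs]
  | succ f ih =>
    intro i small large hi hfuel
    rw [divPairs]
    by_cases hle : i * i ≤ s
    · have hsq : i ≤ Int.sqrt s := (le_sqrt_iff s i hi).mpr hle
      rw [PySem.List.pyRange_one_cons (by omega)]
      simp only [List.filter_cons]
      by_cases hp : (PySem.Int.mod s i == 0) = true
      · simp only [if_pos hle, hp]
        by_cases hq : (i == PySem.Int.floordiv s i) = true
        · have hne : (i != PySem.Int.floordiv s i) = false := by
            simp only [bne, hq, Bool.not_true]
          rw [if_pos hq, ih (i + 1) _ _ (by omega) (by omega)]
          simp [hne]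
        · have hne : (i != PySem.Int.floordiv s i) = true := by
            simp only [bne, Bool.not_eq_true'] at *
            simp [hq]
          rw [if_neg hq, ih (i + 1) _ _ (by omega) (by omega)]
          simp [hne]
      · simp only [if_pos hle, if_neg hp,
          ih (i + 1) small large (by omega) (by omega)]
        simp [hp]
    · have hsq : Int.sqrt s < i := by
        by_contra hcon
        exact hle ((le_sqrt_iff s i hi).mp (by omega))
      rw [if_neg hle, PySem.List.pyRange_one_eq_nil (by omega)]
      simp

-- two strictly increasing integer lists with the same members are equal
theorem eq_of_pairwise_lt_of_mem_iff {l1 l2 : List Int}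
    (h1 : l1.Pairwise (· < ·)) (h2 : l2.Pairwise (· < ·))
    (hm : ∀ x, x ∈ l1 ↔ x ∈ l2) : l1 = l2 := by
  refine List.Perm.eq_of_pairwise (fun a _ b _ hab hba => absurd hba (lt_asymm hab)) h1 h2 ?_
  refine (List.perm_ext_iff_of_nodup ?_ ?_).mpr hm
  · exact h1.imp ne_of_lt
  · exact h2.imp ne_of_lt

theorem mem_divList (s x : Int) (hs : 1 ≤ s) :
    x ∈ divList s ↔ 1 ≤ x ∧ x ≤ s ∧ x ∣ s := by
  simp only [divList, List.mem_filter, PySem.List.mem_pyRange_one, mod_beq_iff]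
  constructor
  · rintro ⟨⟨h1, h2⟩, h3⟩; exact ⟨h1, by omega, h3⟩
  · rintro ⟨h1, h2, h3⟩; exact ⟨⟨h1, by omega⟩, h3⟩

theorem pairwise_divList (s : Int) : (divList s).Pairwise (· < ·) :=
  (PySem.List.pairwise_lt_pyRange_one 1 (s + 1)).filter _

theorem divisorsA_hsplit (s : Int) (hs : 1 ≤ s) :
    divList s = (PySem.List.pyRange 1 (PySem.Int.floordiv s 2 + 1) 1).filter
      (fun d => PySem.Int.mod s d == 0) ++ [s] := by
  have hm : PySem.Int.floordiv s 2 = s / 2 := PySem.Int.floordiv_eq_ediv_of_pos (by omega)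
  unfold divList
  rw [PySem.List.pyRange_one_append 1 (PySem.Int.floordiv s 2 + 1) (s + 1) (by omega)
      (by rw [hm]; omega)]
  rw [List.filter_append]
  congr 1
  rw [show s + 1 = s + 1 from rfl, PySem.List.pyRange_one_succ_right (by rw [hm]; omega),
    List.filter_append]
  have h1 : (PySem.List.pyRange (PySem.Int.floordiv s 2 + 1) s 1).filter
      (fun d => PySem.Int.mod s d == 0) = [] := by
    rw [List.filter_eq_nil_iff]
    intro j hj
    rw [PySem.List.mem_pyRange_one] at hj
    intro hp
    rw [mod_beq_iff] at hp
    obtain ⟨c, hc⟩ := hp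
    have hj1 : 1 ≤ j := by rw [hm] at hj; omega
    have hc2 : 2 ≤ c := by nlinarith
    have hle : j * 2 ≤ s := by nlinarith
    rw [hm] at hj
    omega
  rw [h1]
  have h2 : (PySem.Int.mod s s == 0) = true := mod_beq_iff s s |>.mpr dvd_rfl
  simp [h2]

theorem divList_cons (s : Int) (hs : 1 ≤ s) :
    divList s = 1 :: (PySem.List.pyRange 2 (s + 1) 1).filter
      (fun d => PySem.Int.mod s d == 0) := by
  unfold divList
  rw [PySem.List.pyRange_one_cons (by omega), List.filter_cons]
  have h1 : (PySem.Int.mod s 1 == 0) = true := mod_beq_iff s 1 |>.mpr (one_dvd s)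
  rw [if_pos h1]; norm_num

theorem divisorsA_eq (s : Int) (hs : 1 ≤ s) :
    divisorsA s = (divList s).filter (fun d => d ≠ 1) := by
  unfold divisorsA
  simp only [PySem.List.foldl_append_if_eq_filter, List.nil_append]
  rw [← divisorsA_hsplit s hs, divList_cons s hs]
  rw [PySem.List.remove?_cons_self]
  simp only [Option.getD_some, List.filter_cons]
  rw [if_neg (by simp)]
  refine (List.filter_eq_self.mpr ?_).symm
  intro a ha
  rw [List.mem_filter, PySem.List.mem_pyRange_one] at ha
  simp only [decide_eq_true_eq]
  omega

theorem cofactor_pos (s j : Int) (hs : 1 ≤ s) (hj : 1 ≤ j) (hd : j ∣ s) :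
    1 ≤ PySem.Int.floordiv s j := by
  have h := floordiv_exact s j hd
  nlinarith [h]

theorem divPairs_eq (s : Int) (hs : 1 ≤ s) :
    (divPairs s s.toNat 1 [] []).1 ++ (divPairs s s.toNat 1 [] []).2.reverse
      = divList s := by
  have hr0 : 0 ≤ Int.sqrt s := Int.sqrt_nonneg s
  have hrs : Int.sqrt s ≤ s := by
    unfold Int.sqrt
    have := Nat.sqrt_le_self s.toNat
    omega
  rw [divPairs_spec s s.toNat 1 [] [] (le_refl 1) (by omega)]
  simp only [List.nil_append]
  -- membership facts for elements of the cofactor list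
  have hlf : ∀ j ∈ (PySem.List.pyRange 1 (Int.sqrt s + 1) 1).filter
      (fun j => PySem.Int.mod s j == 0 && j != PySem.Int.floordiv s j),
      1 ≤ j ∧ j ≤ Int.sqrt s ∧ j ∣ s ∧ Int.sqrt s < PySem.Int.floordiv s j ∧
        j < PySem.Int.floordiv s j := by
    intro j hj
    rw [List.mem_filter, PySem.List.mem_pyRange_one, Bool.and_eq_true, mod_beq_iff,
      bne_iff_ne] at hj
    obtain ⟨⟨hj1, hj2⟩, hdvd, hne⟩ := hj
    have hq := floordiv_exact s j hdvd
    have hq1 : 1 ≤ PySem.Int.floordiv s j := cofactor_pos s j hs (by omega) hdvd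
    have hjj : j * j ≤ s := (le_sqrt_iff s j (by omega)).mp (by omega)
    have hlt : j < PySem.Int.floordiv s j := by
      rcases lt_trichotomy j (PySem.Int.floordiv s j) with h | h | h
      · exact h
      · exact absurd h hne
      · nlinarith
    refine ⟨by omega, by omega, hdvd, ?_, hlt⟩
    by_contra hcon
    have : PySem.Int.floordiv s j ≤ Int.sqrt s := by omega
    have := (le_sqrt_iff s (PySem.Int.floordiv s j) (by omega)).mp this
    nlinarith
  apply eq_of_pairwise_lt_of_mem_iff
  · rw [List.pairwise_append]
    refine ⟨?_, ?_, ?_⟩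
    · exact (PySem.List.pairwise_lt_pyRange_one 1 (Int.sqrt s + 1)).filter _
    · rw [List.pairwise_reverse, List.pairwise_map]
      have hpw : ((PySem.List.pyRange 1 (Int.sqrt s + 1) 1).filter
          (fun j => PySem.Int.mod s j == 0 && j != PySem.Int.floordiv s j)).Pairwise
            (· < ·) :=
        (PySem.List.pairwise_lt_pyRange_one 1 (Int.sqrt s + 1)).filter _
      refine List.Pairwise.imp_of_mem ?_ hpw
      intro a b ha hb hab
      obtain ⟨ha1, _, hda, _, _⟩ := hlf a ha
      obtain ⟨hb1, _, hdb, _, _⟩ := hlf b hb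
      have hqa := floordiv_exact s a hda
      have hqb := floordiv_exact s b hdb
      have hqb1 : 1 ≤ PySem.Int.floordiv s b := cofactor_pos s b hs hb1 hdb
      nlinarith
    · intro a ha x hx
      rw [List.mem_filter, PySem.List.mem_pyRange_one] at ha
      rw [List.mem_reverse, List.mem_map] at hx
      obtain ⟨j, hj, rfl⟩ := hx
      obtain ⟨_, _, _, hgt, _⟩ := hlf j hj
      omega
  · exact pairwise_divList s
  · intro x
    rw [mem_divList s x hs, List.mem_append, List.mem_reverse, List.mem_map]
    constructor
    · rintro (hx | ⟨j, hj, rfl⟩)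
      · rw [List.mem_filter, PySem.List.mem_pyRange_one, mod_beq_iff] at hx
        exact ⟨by omega, by omega, hx.2⟩
      · obtain ⟨hj1, _, hdvd, hgt, _⟩ := hlf j hj
        have hq := floordiv_exact s j hdvd
        have hq1 : 1 ≤ PySem.Int.floordiv s j := cofactor_pos s j hs hj1 hdvd
        exact ⟨by omega, by nlinarith, j, by linarith⟩
    · rintro ⟨hx1, hxs, hdvd⟩
      obtain ⟨c, hc⟩ := hdvd
      have hc1 : 1 ≤ c := by nlinarith
      by_cases hxr : x ≤ Int.sqrt s
      · left
        rw [List.mem_filter, PySem.List.mem_pyRange_one, mod_beq_iff]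
        exact ⟨⟨by omega, by omega⟩, ⟨c, hc⟩⟩
      · right
        have hxx : s < x * x := by
          by_contra hcon
          exact hxr ((le_sqrt_iff s x (by omega)).mpr (by omega))
        have hcx : c < x := by nlinarith
        have hcc : c * c < s := by nlinarith
        have hcdvd : c ∣ s := ⟨x, by rw [hc]; ring⟩
        have hqc := floordiv_exact s c hcdvd
        have hqcx : PySem.Int.floordiv s c = x := by
          have : PySem.Int.floordiv s c * c = x * c := by rw [hqc, hc]
          exact mul_right_cancel₀ (by omega) this
        refine ⟨c, ?_, hqcx⟩
        rw [List.mem_filter, PySem.List.mem_pyRange_one, Bool.and_eq_true, mod_beq_iff,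
          bne_iff_ne]
        have hcr : c ≤ Int.sqrt s := (le_sqrt_iff s c (by omega)).mpr (by omega)
        exact ⟨⟨by omega, by omega⟩, hcdvd, by omega⟩

-- ===== VERDICT (by name: the statement is the Claim_ definition above) =====
theorem seatsToFill_spec : Claim_equal_seatsToFill := by
  intro x y s _ hpre
  unfold Pre_seatsToFill at hpre
  unfold Spec_seatsToFill seatsToFill seatsToFill_alt
  have hdiv : (divPairs s s.toNat 1 [] []).1 ++ ((divPairs s s.toNat 1 [] []).2).reverse
      = divList s := divPairs_eq s hpre
  simp only [hdiv, divisorsA_eq s hpre]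
  simp only [PySem.List.foldl_append_singleton_eq_map, PySem.List.foldl_append_eq_flatMap,
    List.map_map, List.nil_append]
  rfl
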